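-- pv_equiv track=rewrite | github.com/Jtian-t/yunce_work | parse_pdf/src/tools/extract_candidate_profile.py | _normalize_skill_text
-- ===== SOURCE A (Python) =====
-- KNOWN_SKILLS = [
--     "Java",
--     "Python",
--     "Spring Boot",
--     "SpringCloud",
--     "SpringMVC",
--     "Spring",
--     "MyBatis",
--     "Mybatis",
--     "MyBatisPlus",
--     "MySQL",
--     "Redis",
--     "Redisson",
--     "RabbitMQ",
--     "Kafka",
--     "Nacos",
--     "Sentinel",
--     "Seata",
--     "LangChain",
--     "RAG",
--     "Tool Calls",
--     "Agent",
--     "Docker",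
--     "Maven",
--     "Git",
--     "JVM",
--     "XXL-Job",
-- ]
--
-- def _normalize_skill_text(value: str) -> str:
--     text = value.strip()
--     if not text:
--         return ""
--     for skill in sorted(KNOWN_SKILLS, key=len, reverse=True):
--         if skill.lower() in text.lower():
--             return skill
--     return ""
-- ===== SOURCE B (Python) =====
-- KNOWN_SKILLS = [
--     "Java",
--     "Python",
--     "Spring Boot",
--     "SpringCloud",
--     "SpringMVC",
--     "Spring",
--     "MyBatis",
--     "Mybatis",
--     "MyBatisPlus",
--     "MySQL",
--     "Redis",
--     "Redisson",
--     "RabbitMQ",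
--     "Kafka",
--     "Nacos",
--     "Sentinel",
--     "Seata",
--     "LangChain",
--     "RAG",
--     "Tool Calls",
--     "Agent",
--     "Docker",
--     "Maven",
--     "Git",
--     "JVM",
--     "XXL-Job",
-- ]
--
-- def _normalize_skill_text(value: str) -> str:
--     text = value.strip().lower()
--     best = ""
--     for skill in KNOWN_SKILLS:
--         if len(skill) > len(best) and skill.lower() in text:
--             best = skill
--     return best
-- ===== Notes on version B (the rewrite author's own statement) =====
-- stated objective: simpler
-- what changed: B drops A's length-sort and early-return scan and instead makes one accumulator pass over KNOWN_SKILLS in original order, keeping the longest matching skill (strict > preserves A's earliest-on-ties rule); the stripped text is lowered once instead of per iteration.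
import Mathlib
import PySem

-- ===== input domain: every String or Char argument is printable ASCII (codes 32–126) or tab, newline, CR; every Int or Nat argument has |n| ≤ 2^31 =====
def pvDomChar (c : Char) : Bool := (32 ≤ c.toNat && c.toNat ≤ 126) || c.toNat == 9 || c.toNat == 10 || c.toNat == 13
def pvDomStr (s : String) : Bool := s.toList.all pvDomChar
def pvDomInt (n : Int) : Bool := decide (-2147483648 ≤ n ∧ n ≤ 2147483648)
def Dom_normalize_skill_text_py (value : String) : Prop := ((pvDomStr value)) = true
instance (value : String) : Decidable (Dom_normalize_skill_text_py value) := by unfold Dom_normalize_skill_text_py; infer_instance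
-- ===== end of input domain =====

-- B replaces A's length-sort + early-return scan by a single accumulator pass over the
-- original list keeping the longest (earliest on ties) matching skill: simpler, no sort.

-- ===== PORT A =====
def KNOWN_SKILLS_py : List String :=
  ["Java", "Python", "Spring Boot", "SpringCloud", "SpringMVC", "Spring", "MyBatis",
   "Mybatis", "MyBatisPlus", "MySQL", "Redis", "Redisson", "RabbitMQ", "Kafka", "Nacos",
   "Sentinel", "Seata", "LangChain", "RAG", "Tool Calls", "Agent", "Docker", "Maven",
   "Git", "JVM", "XXL-Job"]

-- A's for-loop with early return ('for skill in …: if …: return skill' then 'return ""')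
def pvALoop (text : String) : List String → String
  | [] => ""
  | skill :: rest =>
      if PySem.Str.isIn (PySem.Str.lower skill) (PySem.Str.lower text) then skill
      else pvALoop text rest

def normalize_skill_text_py (value : String) : String :=
  let text := PySem.Str.strip value
  if text = "" then ""
  else pvALoop text (PySem.List.sorted KNOWN_SKILLS_py PySem.Str.len true)

-- ===== PORT B =====
def normalize_skill_text_py_alt (value : String) : String :=
  let text := PySem.Str.lower (PySem.Str.strip value)
  KNOWN_SKILLS_py.foldl
    (fun best skill =>
      if (decide (PySem.Str.len best < PySem.Str.len skill)
            && PySem.Str.isIn (PySem.Str.lower skill) text) = true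
      then skill else best) ""

-- ===== PRECONDITION & SPEC =====
def Spec_normalize_skill_text_py (value : String) (out : String) : Prop := out = normalize_skill_text_py_alt value
instance (value : String) (out : String) : Decidable (Spec_normalize_skill_text_py value out) := by unfold Spec_normalize_skill_text_py; infer_instance

-- ===== CLAIM (what is proved, stated in full; the proofs are below) =====
def Claim_equal_normalize_skill_text_py : Prop := ∀ (value : String), Dom_normalize_skill_text_py value → Spec_normalize_skill_text_py value (normalize_skill_text_py value)

-- ===== LEMMAS AND PROOFS =====

-- first element satisfying p, else "" (A's loop with its predicate abstracted)
def pvFirst (p : String → Bool) : List String → String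
  | [] => ""
  | s :: t => if p s then s else pvFirst p t

theorem pvALoop_eq_pvFirst (text : String) (L : List String) :
    pvALoop text L =
      pvFirst (fun s => PySem.Str.isIn (PySem.Str.lower s) (PySem.Str.lower text)) L := by
  induction L with
  | nil => rfl
  | cons s t ih => simp [pvALoop, pvFirst, ih]

theorem pvFirst_eq_empty_or_mem (p : String → Bool) (L : List String) :
    pvFirst p L = "" ∨ pvFirst p L ∈ L := by
  induction L with
  | nil => exact Or.inl rfl
  | cons s t ih =>
      by_cases h : p s
      · simp [pvFirst, h]
      · rcases ih with h' | h' <;> simp [pvFirst, h, h', Or.inr]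

-- key step: inserting x into a length-descending list commutes with B's accumulator step
theorem pvFirst_insertBy (p : String → Bool) (x : String) (L : List String)
    (hs : L.Pairwise (fun a b => PySem.Str.len b ≤ PySem.Str.len a)) :
    pvFirst p (PySem.List.insertBy
        (fun a b => decide (PySem.Str.len b < PySem.Str.len a)) x L)
      = if (decide (PySem.Str.len (pvFirst p L) < PySem.Str.len x) && p x) = true
        then x else pvFirst p L := by
  have hcons : ∀ (z : String) (l : List String),
      pvFirst p (z :: l) = if p z = true then z else pvFirst p l := fun _ _ => rfl
  induction L with
  | nil =>
      have hins0 : PySem.List.insertBy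
          (fun a b => decide (PySem.Str.len b < PySem.Str.len a)) x [] = [x] := rfl
      rw [hins0]
      by_cases h0 : x = ""
      · subst h0; simp [pvFirst]
      · have hpos : 0 < x.length := by
          rcases Nat.eq_zero_or_pos x.length with hz | hp
          · exact absurd (String.toList_eq_nil_iff.mp
              (List.length_eq_zero_iff.mp (by simpa using hz))) h0
          · exact hp
        simp [pvFirst, hpos]
  | cons y t ih =>
      have hyt : ∀ s ∈ t, PySem.Str.len s ≤ PySem.Str.len y := by
        intro s hsme; exact (List.pairwise_cons.mp hs).1 s hsme
      have ht : t.Pairwise (fun a b => PySem.Str.len b ≤ PySem.Str.len a) :=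
        (List.pairwise_cons.mp hs).2
      have hins : PySem.List.insertBy
          (fun a b => decide (PySem.Str.len b < PySem.Str.len a)) x (y :: t)
          = if decide (PySem.Str.len y < PySem.Str.len x) = true then x :: y :: t
            else y :: PySem.List.insertBy
              (fun a b => decide (PySem.Str.len b < PySem.Str.len a)) x t := rfl
      by_cases hb : y.length < x.length
      · -- x is inserted at the front of y :: t
        have hbI : PySem.Str.len y < PySem.Str.len x := by
          rw [PySem.Str.len_eq, PySem.Str.len_eq]; exact_mod_cast hb
        have h1 : PySem.List.insertBy
            (fun a b => decide (PySem.Str.len b < PySem.Str.len a)) x (y :: t)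
            = x :: y :: t := by rw [hins, if_pos (decide_eq_true hbI)]
        have hfleN : (pvFirst p (y :: t)).length < x.length := by
          rcases pvFirst_eq_empty_or_mem p (y :: t) with h' | h'
          · rw [h']; exact lt_of_le_of_lt (Nat.zero_le _) hb
          · rcases List.mem_cons.mp h' with h'' | h''
            · rw [h'']; exact hb
            · have := hyt _ h''
              rw [PySem.Str.len_eq, PySem.Str.len_eq] at this
              exact lt_of_le_of_lt (by exact_mod_cast this) hb
        rw [h1]
        simp only [hcons] at hfleN
        simp [hcons, hfleN]
      · -- x goes after y
        have hbIn : ¬ PySem.Str.len y < PySem.Str.len x := by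
          rw [PySem.Str.len_eq, PySem.Str.len_eq]
          exact fun hc => hb (by exact_mod_cast hc)
        have h1 : PySem.List.insertBy
            (fun a b => decide (PySem.Str.len b < PySem.Str.len a)) x (y :: t)
            = y :: PySem.List.insertBy
                (fun a b => decide (PySem.Str.len b < PySem.Str.len a)) x t := by
          rw [hins, if_neg (by rw [decide_eq_false hbIn]; simp)]
        rw [h1]
        rcases Bool.eq_false_or_eq_true (p y) with hpy | hpy
        · simp [hcons, hpy, eq_false hb]
        · simp only [hcons, hpy, Bool.false_eq_true, if_false]
          exact ih ht

-- B's one-pass fold over the original list equals A's scan of the stable length-descending sort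
theorem pvFold_eq_pvFirst_sorted (p : String → Bool) (xs : List String) :
    xs.foldl
      (fun best skill =>
        if (decide (PySem.Str.len best < PySem.Str.len skill) && p skill) = true
        then skill else best) ""
      = pvFirst p (PySem.List.sorted xs PySem.Str.len true) := by
  induction xs using List.reverseRecOn with
  | nil => rfl
  | append_singleton xs x ih =>
      rw [PySem.List.sorted_rev_eq_foldl_insertBy, List.foldl_append, List.foldl_append]
      rw [← PySem.List.sorted_rev_eq_foldl_insertBy]
      simp only [List.foldl_cons, List.foldl_nil]
      rw [pvFirst_insertBy p x _ (PySem.List.sorted_pairwise_rev xs PySem.Str.len), ← ih]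

-- ===== VERDICT (by name: the statement is the Claim_ definition above) =====
set_option maxRecDepth 100000 in
theorem normalize_skill_text_py_spec : Claim_equal_normalize_skill_text_py := by
  intro value _
  unfold Spec_normalize_skill_text_py normalize_skill_text_py normalize_skill_text_py_alt
  by_cases h : PySem.Str.strip value = ""
  · rw [h, if_pos rfl]
    decide
  · rw [if_neg h, pvALoop_eq_pvFirst, ← pvFold_eq_pvFirst_sorted]
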